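-- pv_equiv track=rewrite | github.com/Lectronics/pbp-Variable-Generator | src/BMFFuncts.py | scaleFont
-- ===== SOURCE A (Python) =====
-- def scaleFont(font, num_of_sizes=1, scale_factor=2) -> list:
--
--     # Defining iteration variables for the while loops that run through the letters, rows of each letter, and bits of each row
--     bit = 0
--     row = 0
--     letter = 1
--
--     new_font = []
--
--
--     for i, letter in enumerate(font[1:]):
--
--         new_font.append([])
--
--         for y, row in enumerate(letter):
--
--             new_font[i].append([])
--
--             for x, bit in enumerate(row):
--
--                 for j in range(scale_factor):
--                     new_font[i][y].append(bit)
--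
--
--     extra_new_font = []
--
--
--     for y, letter in enumerate(new_font):
--
--         extra_new_font.append([])
--
--         for row in letter:
--
--             for j in range(scale_factor):
--                 extra_new_font[y].append(row)
--
--
--     return extra_new_font
-- ===== SOURCE B (Python) =====
-- def scaleFont(font, num_of_sizes=1, scale_factor=2) -> list:
--     # One fused pass over font[1:]: each row is horizontally scaled once,
--     # then that same scaled row is appended scale_factor times.
--     result = []
--     for letter in font[1:]:
--         scaled_letter = []
--         for row in letter:
--             scaled_row = [bit for bit in row for _ in range(scale_factor)]
--             for _ in range(scale_factor):
--                 scaled_letter.append(scaled_row)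
--         result.append(scaled_letter)
--     return result
-- ===== Notes on version B (the rewrite author's own statement) =====
-- stated objective: simpler
-- what changed: Fuses A's two full passes (horizontal bit scaling building new_font, then a second vertical pass duplicating rows) into a single traversal that scales each row once and appends it scale_factor times.
import Mathlib
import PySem

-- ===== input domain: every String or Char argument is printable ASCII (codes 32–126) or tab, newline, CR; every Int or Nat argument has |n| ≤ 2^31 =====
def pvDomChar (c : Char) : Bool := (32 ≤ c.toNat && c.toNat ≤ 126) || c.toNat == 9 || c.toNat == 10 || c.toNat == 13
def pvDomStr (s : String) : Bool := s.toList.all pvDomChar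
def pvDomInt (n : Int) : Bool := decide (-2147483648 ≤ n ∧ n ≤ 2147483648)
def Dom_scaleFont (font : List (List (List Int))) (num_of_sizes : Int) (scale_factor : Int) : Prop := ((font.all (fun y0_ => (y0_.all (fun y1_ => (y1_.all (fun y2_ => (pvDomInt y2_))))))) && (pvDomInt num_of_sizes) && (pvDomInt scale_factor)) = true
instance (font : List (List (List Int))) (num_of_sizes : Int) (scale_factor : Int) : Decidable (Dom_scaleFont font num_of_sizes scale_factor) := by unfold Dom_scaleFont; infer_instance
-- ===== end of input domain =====

-- ===== PORT A =====
-- Port of A: first pass scales each row horizontally into new_font,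
-- second pass duplicates each row vertically into extra_new_font.
def scaleFont (font : List (List (List Int))) (num_of_sizes : Int) (scale_factor : Int) : List (List (List Int)) :=
  let new_font : List (List (List Int)) :=
    (font.drop 1).foldl (fun nf letter =>
      nf ++ [letter.foldl (fun nl row =>
        nl ++ [row.foldl (fun nr bit =>
          (PySem.List.pyRange 0 scale_factor 1).foldl (fun a _ => a ++ [bit]) nr) []]) []]) []
  new_font.foldl (fun enf letter =>
    enf ++ [letter.foldl (fun el row =>
      (PySem.List.pyRange 0 scale_factor 1).foldl (fun a _ => a ++ [row]) el) []]) []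

-- ===== PORT B =====
-- Port of B: one fused pass; each row is scaled horizontally once and the
-- resulting scaled_row is appended scale_factor times.
def scaleFont_alt (font : List (List (List Int))) (num_of_sizes : Int) (scale_factor : Int) : List (List (List Int)) :=
  (font.drop 1).foldl (fun res letter =>
    res ++ [letter.foldl (fun sl row =>
      let scaled_row := row.flatMap (fun bit => (PySem.List.pyRange 0 scale_factor 1).map (fun _ => bit))
      (PySem.List.pyRange 0 scale_factor 1).foldl (fun a _ => a ++ [scaled_row]) sl) []]) []

-- ===== PRECONDITION & SPEC =====
def Spec_scaleFont (font : List (List (List Int))) (num_of_sizes : Int) (scale_factor : Int) (out : List (List (List Int))) : Prop := out = scaleFont_alt font num_of_sizes scale_factor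
instance (font : List (List (List Int))) (num_of_sizes : Int) (scale_factor : Int) (out : List (List (List Int))) : Decidable (Spec_scaleFont font num_of_sizes scale_factor out) := by unfold Spec_scaleFont; infer_instance

-- ===== CLAIM (what is proved, stated in full; the proofs are below) =====
def Claim_equal_scaleFont : Prop := ∀ (font : List (List (List Int))) (num_of_sizes : Int) (scale_factor : Int), Dom_scaleFont font num_of_sizes scale_factor → Spec_scaleFont font num_of_sizes scale_factor (scaleFont font num_of_sizes scale_factor)

-- ===== LEMMAS AND PROOFS =====

-- ===== VERDICT (by name: the statement is the Claim_ definition above) =====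
-- both folds appending a constant element are acc ++ replicate-like maps
lemma foldl_append_const {α β : Type} (m : List β) (x : α) :
    ∀ acc : List α, m.foldl (fun a _ => a ++ [x]) acc = acc ++ m.map (fun _ => x) := by
  induction m with
  | nil => simp
  | cons h t ih => intro acc; simp [List.foldl, ih]

lemma hrow_eq (sf : Int) (row : List Int) :
    row.foldl (fun nr bit =>
      (PySem.List.pyRange 0 sf 1).foldl (fun a _ => a ++ [bit]) nr) []
    = row.flatMap (fun bit => (PySem.List.pyRange 0 sf 1).map (fun _ => bit)) := by
  have h : row.foldl (fun nr bit =>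
      (PySem.List.pyRange 0 sf 1).foldl (fun a _ => a ++ [bit]) nr) []
    = row.foldl (fun nr bit =>
      nr ++ (PySem.List.pyRange 0 sf 1).map (fun _ => bit)) [] := by
    apply PySem.List.foldl_congr_mem
    intro acc bit _
    exact foldl_append_const _ _ _
  rw [h, PySem.List.foldl_append_eq_flatMap]
  simp

theorem scaleFont_spec : Claim_equal_scaleFont := by
  intro font num_of_sizes scale_factor _
  unfold Spec_scaleFont scaleFont scaleFont_alt
  rw [PySem.List.foldl_append_singleton_eq_map, PySem.List.foldl_append_singleton_eq_map,
      PySem.List.foldl_append_singleton_eq_map]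
  simp only [List.nil_append, List.map_map]
  congr 1
  funext letter
  simp only [Function.comp]
  rw [PySem.List.foldl_append_singleton_eq_map]
  simp only [List.nil_append]
  have hA : (letter.map (fun row => row.foldl (fun nr bit =>
        (PySem.List.pyRange 0 scale_factor 1).foldl (fun a _ => a ++ [bit]) nr) [])).foldl
      (fun el row => (PySem.List.pyRange 0 scale_factor 1).foldl (fun a _ => a ++ [row]) el) []
    = (letter.map (fun row => row.foldl (fun nr bit =>
        (PySem.List.pyRange 0 scale_factor 1).foldl (fun a _ => a ++ [bit]) nr) [])).foldl
      (fun el row => el ++ (PySem.List.pyRange 0 scale_factor 1).map (fun _ => row)) [] := by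
    apply PySem.List.foldl_congr_mem
    intro acc row _
    exact foldl_append_const _ _ _
  have hB : letter.foldl (fun sl row =>
      (PySem.List.pyRange 0 scale_factor 1).foldl (fun a _ =>
        a ++ [row.flatMap (fun bit => (PySem.List.pyRange 0 scale_factor 1).map (fun _ => bit))]) sl) []
    = letter.foldl (fun sl row =>
      sl ++ (PySem.List.pyRange 0 scale_factor 1).map (fun _ =>
        row.flatMap (fun bit => (PySem.List.pyRange 0 scale_factor 1).map (fun _ => bit)))) [] := by
    apply PySem.List.foldl_congr_mem
    intro acc row _
    exact foldl_append_const _ _ _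
  rw [hA, hB, PySem.List.foldl_append_eq_flatMap, PySem.List.foldl_append_eq_flatMap]
  simp only [List.nil_append, List.flatMap_map]
  congr 1
  funext row
  rw [hrow_eq]
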